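-- pv_equiv track=rewrite | github.com/cokenotfound/Broadcast-Signal-Encoding-and-Transmission-Using-UDP | encode.py | chain_encode
-- ===== SOURCE A (Python) =====
-- def chain_encode(c1,c2,c3,d1,d2,d3):
--     s1 = [0] * (len(c1) * len(d1))
--     s2 = [0] * (len(c2) * len(d2))
--     s3 = [0] * (len(c3) * len(d3))
--
--     s1=XORing(c1,d1,s1)
--     s2=XORing(c2,d2,s2)
--     s3=XORing(c3,d3,s3)
--
--     s1=convertBitToSignal(s1)
--     s2=convertBitToSignal(s2)
--     s3=convertBitToSignal(s3)
--
--     Signal=[]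
--     for i in range(len(s1)):
--         Signal.append(s1[i]+s2[i]+s3[i])
--
--     return Signal
--
-- def XORing(c, d, s):
--     k=0
--     for i in range(len(d)):
--         for j in range(len(c)):
--             s[k] = d[i] ^ c[j]
--             k+=1
--     return s
--
-- def convertBitToSignal(arr):
--     for i in range(len(arr)):
--         if arr[i] == 0:
--             arr[i] = 1
--         else:
--             arr[i] = -1
--     return arr
-- ===== SOURCE B (Python) =====
-- def chain_encode(c1, c2, c3, d1, d2, d3):
--     # Direct index arithmetic: entry k of each spread signal is determined by
--     # divmod(k, len(c)); the signal is +1 iff the data bit equals the code bit.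
--     def term(c, d, k):
--         i, j = divmod(k, len(c))
--         return 1 if d[i] == c[j] else -1
--     return [term(c1, d1, k) + term(c2, d2, k) + term(c3, d3, k)
--             for k in range(len(c1) * len(d1))]
-- ===== Notes on version B (the rewrite author's own statement) =====
-- stated objective: alternative
-- what changed: B never materialises the three spread-signal arrays: it makes one pass over the output indices and computes each entry directly by divmod index arithmetic, emitting +1 iff d[k//len(c)] == c[k%len(c)] (equality replaces the XOR-then-map-0/nonzero passes).
import Mathlib
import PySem

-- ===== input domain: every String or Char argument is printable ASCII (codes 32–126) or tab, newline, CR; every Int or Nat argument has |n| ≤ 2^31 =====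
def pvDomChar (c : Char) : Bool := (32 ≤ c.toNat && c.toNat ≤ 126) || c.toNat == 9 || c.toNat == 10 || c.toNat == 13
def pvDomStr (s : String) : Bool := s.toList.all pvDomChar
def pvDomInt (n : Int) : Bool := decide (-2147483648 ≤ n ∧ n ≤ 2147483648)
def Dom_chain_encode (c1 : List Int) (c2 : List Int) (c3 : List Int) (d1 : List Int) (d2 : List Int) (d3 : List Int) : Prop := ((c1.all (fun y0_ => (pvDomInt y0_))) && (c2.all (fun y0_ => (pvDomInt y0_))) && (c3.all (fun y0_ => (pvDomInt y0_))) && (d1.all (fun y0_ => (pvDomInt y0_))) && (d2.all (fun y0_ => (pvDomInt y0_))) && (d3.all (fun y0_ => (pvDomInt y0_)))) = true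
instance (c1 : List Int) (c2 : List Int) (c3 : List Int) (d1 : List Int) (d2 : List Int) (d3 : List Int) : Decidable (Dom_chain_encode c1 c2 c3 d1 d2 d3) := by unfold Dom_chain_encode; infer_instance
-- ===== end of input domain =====

-- B computes each output entry directly by divmod index arithmetic (d[k//len(c)] == c[k%len(c)])
-- in a single pass over output indices, with no intermediate spread-signal arrays (objective: alternative).

-- ===== PORT A =====
-- XORing(c, d, s): nested index loops writing d[i]^c[j] into s[k], k incrementing
def pvXORing (c d s : List Int) : List Int :=
  ((PySem.List.pyRange 0 (d.length : Int) 1).foldl (fun (st : List Int × Int) i =>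
      (PySem.List.pyRange 0 (c.length : Int) 1).foldl (fun (st2 : List Int × Int) j =>
          (PySem.List.pySetD st2.1 st2.2
             (PySem.Int.bxor (PySem.List.pyGetD d i 0) (PySem.List.pyGetD c j 0)), st2.2 + 1))
        st)
    (s, 0)).1

-- convertBitToSignal(arr): in-place pass turning 0 into 1 and anything else into -1
def pvConvert (arr : List Int) : List Int :=
  (PySem.List.pyRange 0 (arr.length : Int) 1).foldl
    (fun acc i =>
      if PySem.List.pyGetD acc i 0 == 0 then PySem.List.pySetD acc i 1
      else PySem.List.pySetD acc i (-1))
    arr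

def chain_encode (c1 : List Int) (c2 : List Int) (c3 : List Int) (d1 : List Int) (d2 : List Int) (d3 : List Int) : List Int :=
  let s1 := List.replicate (c1.length * d1.length) (0 : Int)
  let s2 := List.replicate (c2.length * d2.length) (0 : Int)
  let s3 := List.replicate (c3.length * d3.length) (0 : Int)
  let s1 := pvXORing c1 d1 s1
  let s2 := pvXORing c2 d2 s2
  let s3 := pvXORing c3 d3 s3
  let s1 := pvConvert s1
  let s2 := pvConvert s2
  let s3 := pvConvert s3
  (PySem.List.pyRange 0 (s1.length : Int) 1).foldl
    (fun acc i =>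
      acc ++ [PySem.List.pyGetD s1 i 0 + PySem.List.pyGetD s2 i 0 + PySem.List.pyGetD s3 i 0])
    []

-- ===== PORT B =====
-- term(c, d, k): i, j = divmod(k, len(c)); 1 if d[i] == c[j] else -1
-- (indices are in range on every k the comprehension reaches inside Pre_, so pyGetD is exact there)
def pvTerm (c d : List Int) (k : Int) : Int :=
  let i := PySem.Int.floordiv k (c.length : Int)
  let j := PySem.Int.mod k (c.length : Int)
  if PySem.List.pyGetD d i 0 == PySem.List.pyGetD c j 0 then 1 else -1

def chain_encode_alt (c1 : List Int) (c2 : List Int) (c3 : List Int) (d1 : List Int) (d2 : List Int) (d3 : List Int) : List Int :=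
  (PySem.List.pyRange 0 ((c1.length * d1.length : Nat) : Int) 1).map
    (fun k => pvTerm c1 d1 k + pvTerm c2 d2 k + pvTerm c3 d3 k)

-- ===== PRECONDITION & SPEC =====
-- Pre_ excludes exactly the inputs where A raises IndexError in the final summation loop
-- (s2[i] or s3[i] with the first signal longer); B raises there too (IndexError or ZeroDivisionError).
def Pre_chain_encode (c1 : List Int) (c2 : List Int) (c3 : List Int) (d1 : List Int) (d2 : List Int) (d3 : List Int) : Prop :=
  c1.length * d1.length ≤ c2.length * d2.length ∧ c1.length * d1.length ≤ c3.length * d3.length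
instance (c1 : List Int) (c2 : List Int) (c3 : List Int) (d1 : List Int) (d2 : List Int) (d3 : List Int) : Decidable (Pre_chain_encode c1 c2 c3 d1 d2 d3) := by unfold Pre_chain_encode; infer_instance

def pvWitness_chain_encode : List Int × List Int × List Int × List Int × List Int × List Int :=
  ([1, 0], [0, 1], [1, 1], [0, 1], [1, 0], [0, 0])

def Spec_chain_encode (c1 : List Int) (c2 : List Int) (c3 : List Int) (d1 : List Int) (d2 : List Int) (d3 : List Int) (out : List Int) : Prop := out = chain_encode_alt c1 c2 c3 d1 d2 d3
instance (c1 : List Int) (c2 : List Int) (c3 : List Int) (d1 : List Int) (d2 : List Int) (d3 : List Int) (out : List Int) : Decidable (Spec_chain_encode c1 c2 c3 d1 d2 d3 out) := by unfold Spec_chain_encode; infer_instance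

-- ===== CLAIM (what is proved, stated in full; the proofs are below) =====
def Claim_equal_chain_encode : Prop := ∀ (c1 : List Int) (c2 : List Int) (c3 : List Int) (d1 : List Int) (d2 : List Int) (d3 : List Int), Dom_chain_encode c1 c2 c3 d1 d2 d3 → Pre_chain_encode c1 c2 c3 d1 d2 d3 → Spec_chain_encode c1 c2 c3 d1 d2 d3 (chain_encode c1 c2 c3 d1 d2 d3)

-- ===== LEMMAS AND PROOFS =====

theorem pv_set_append (pre : List Int) (r : Int) (rs : List Int) (v : Int) :
    (pre ++ r :: rs).set pre.length v = pre ++ v :: rs := by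
  induction pre with
  | nil => rfl
  | cons p ps ih => simp [ih]

theorem pv_getD_append (pre : List Int) (r : Int) (rs : List Int) :
    PySem.List.pyGetD (pre ++ r :: rs) (pre.length : Int) 0 = r := by
  rw [PySem.List.pyGetD_natCast]
  simp [List.getD]

theorem pv_fill_inner (x : Int) :
    ∀ (c pre rest : List Int), c.length ≤ rest.length →
      c.foldl (fun (st2 : List Int × Int) cj =>
          (PySem.List.pySetD st2.1 st2.2 (PySem.Int.bxor x cj), st2.2 + 1))
        (pre ++ rest, (pre.length : Int))
      = (pre ++ c.map (fun cj => PySem.Int.bxor x cj) ++ rest.drop c.length,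
         ((pre.length + c.length : Nat) : Int)) := by
  intro c
  induction c with
  | nil => intro pre rest _; simp
  | cons cj cs ih =>
    intro pre rest hle
    cases rest with
    | nil => simp at hle
    | cons r rs =>
      simp only [List.foldl_cons, PySem.List.pySetD_natCast, pv_set_append]
      have h1 : ((pre.length : Int) + 1) = (((pre ++ [PySem.Int.bxor x cj]).length : Nat) : Int) := by
        push_cast [List.length_append, List.length_cons, List.length_nil]; ring
      have h2 : pre ++ PySem.Int.bxor x cj :: rs = (pre ++ [PySem.Int.bxor x cj]) ++ rs := by simp
      rw [h1, h2, ih (pre ++ [PySem.Int.bxor x cj]) rs (by simpa using hle)]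
      simp only [Prod.mk.injEq]
      refine ⟨by simp, by push_cast [List.length_append, List.length_cons, List.length_nil]; ring⟩

theorem pv_fill_outer (c : List Int) :
    ∀ (d pre rest : List Int), c.length * d.length ≤ rest.length →
      d.foldl (fun (st : List Int × Int) di =>
          c.foldl (fun (st2 : List Int × Int) cj =>
              (PySem.List.pySetD st2.1 st2.2 (PySem.Int.bxor di cj), st2.2 + 1)) st)
        (pre ++ rest, (pre.length : Int))
      = (pre ++ d.flatMap (fun di => c.map (fun cj => PySem.Int.bxor di cj))
              ++ rest.drop (c.length * d.length),
         ((pre.length + c.length * d.length : Nat) : Int)) := by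
  intro d
  induction d with
  | nil => intro pre rest _; simp
  | cons di ds ih =>
    intro pre rest hle
    simp only [List.foldl_cons]
    rw [pv_fill_inner di c pre rest (by simp [Nat.mul_succ] at hle; omega)]
    have h1 : ((pre.length + c.length : Nat) : Int)
        = (((pre ++ c.map (fun cj => PySem.Int.bxor di cj)).length : Nat) : Int) := by simp
    have h2 : pre ++ c.map (fun cj => PySem.Int.bxor di cj) ++ rest.drop c.length
        = (pre ++ c.map (fun cj => PySem.Int.bxor di cj)) ++ rest.drop c.length := by simp
    rw [h1, ih (pre ++ c.map (fun cj => PySem.Int.bxor di cj)) (rest.drop c.length)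
         (by simp [Nat.mul_succ] at hle ⊢; omega)]
    simp only [Prod.mk.injEq]
    constructor
    · simp only [List.flatMap_cons, List.drop_drop, List.append_assoc, List.length_cons]
      rw [show c.length + c.length * ds.length = c.length * (ds.length + 1) by ring]
    · simp only [List.length_append, List.length_map, List.length_cons]
      push_cast [List.length_append, List.length_cons, List.length_nil]; ring

theorem pvXORing_eq (c d : List Int) :
    pvXORing c d (List.replicate (c.length * d.length) 0)
      = d.flatMap (fun di => c.map (fun cj => PySem.Int.bxor di cj)) := by
  unfold pvXORing
  rw [PySem.List.foldl_pyRange_zero_pyGetD' d 0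
      (fun (st : List Int × Int) di =>
        (PySem.List.pyRange 0 (c.length : Int) 1).foldl (fun (st2 : List Int × Int) j =>
          (PySem.List.pySetD st2.1 st2.2 (PySem.Int.bxor di (PySem.List.pyGetD c j 0)), st2.2 + 1)) st)]
  have hinner : ∀ (st : List Int × Int) (di : Int),
      (PySem.List.pyRange 0 (c.length : Int) 1).foldl (fun (st2 : List Int × Int) j =>
          (PySem.List.pySetD st2.1 st2.2 (PySem.Int.bxor di (PySem.List.pyGetD c j 0)), st2.2 + 1)) st
      = c.foldl (fun (st2 : List Int × Int) cj =>
          (PySem.List.pySetD st2.1 st2.2 (PySem.Int.bxor di cj), st2.2 + 1)) st := by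
    intro st di
    exact PySem.List.foldl_pyRange_zero_pyGetD' c 0
      (fun (st2 : List Int × Int) cj =>
        (PySem.List.pySetD st2.1 st2.2 (PySem.Int.bxor di cj), st2.2 + 1)) st
  simp only [hinner]
  have := pv_fill_outer c d [] (List.replicate (c.length * d.length) 0)
    (by simp)
  simp only [List.nil_append, List.length_nil, Nat.cast_zero] at this
  rw [this]
  simp

theorem pv_conv_inv :
    ∀ (post pre : List Int),
      (PySem.List.pyRange (pre.length : Int) ((pre.length + post.length : Nat) : Int) 1).foldl
        (fun acc i =>
          if PySem.List.pyGetD acc i 0 == 0 then PySem.List.pySetD acc i 1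
          else PySem.List.pySetD acc i (-1))
        (pre ++ post)
      = pre ++ post.map (fun x => if x == 0 then (1 : Int) else -1) := by
  intro post
  induction post with
  | nil => intro pre; rw [PySem.List.pyRange_one_eq_nil (by simp)]; simp
  | cons x xs ih =>
    intro pre
    rw [PySem.List.pyRange_one_cons (by push_cast [List.length_cons]; omega)]
    simp only [List.foldl_cons, pv_getD_append, PySem.List.pySetD_natCast, pv_set_append]
    by_cases hx : x = 0
    · subst hx
      have h1 : ((pre.length : Int) + 1) = (((pre ++ [(1 : Int)]).length : Nat) : Int) := by
        push_cast [List.length_append, List.length_cons, List.length_nil]; ring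
      have h2 : ((pre.length + ((0 : Int) :: xs).length : Nat) : Int)
          = (((pre ++ [(1 : Int)]).length + xs.length : Nat) : Int) := by push_cast [List.length_append, List.length_cons, List.length_nil]; ring
      simp only [beq_self_eq_true, if_true]
      rw [show pre ++ (1 : Int) :: xs = (pre ++ [(1 : Int)]) ++ xs by simp, h1, h2, ih (pre ++ [(1 : Int)])]
      simp
    · have hb : (x == (0 : Int)) = false := by simpa using hx
      have h1 : ((pre.length : Int) + 1) = (((pre ++ [(-1 : Int)]).length : Nat) : Int) := by
        push_cast [List.length_append, List.length_cons, List.length_nil]; ring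
      have h2 : ((pre.length + (x :: xs).length : Nat) : Int)
          = (((pre ++ [(-1 : Int)]).length + xs.length : Nat) : Int) := by push_cast [List.length_append, List.length_cons, List.length_nil]; ring
      simp only [hb, Bool.false_eq_true, if_false]
      rw [show pre ++ (-1 : Int) :: xs = (pre ++ [(-1 : Int)]) ++ xs by simp, h1, h2, ih (pre ++ [(-1 : Int)])]
      simp [hx]

theorem pvConvert_eq (arr : List Int) :
    pvConvert arr = arr.map (fun x => if x == 0 then (1 : Int) else -1) := by
  unfold pvConvert
  have := pv_conv_inv arr []
  simpa using this

-- the signal list A builds for one (code, data) pair, in closed form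
theorem pvSignal_eq (c d : List Int) :
    pvConvert (pvXORing c d (List.replicate (c.length * d.length) 0))
      = d.flatMap (fun di => c.map (fun cj => if PySem.Int.bxor di cj == 0 then (1 : Int) else -1)) := by
  rw [pvXORing_eq, pvConvert_eq]
  rw [List.map_flatMap]
  simp [List.map_map, Function.comp_def]

theorem pvSignal_length (c d : List Int) :
    (d.flatMap (fun di => c.map (fun cj => if PySem.Int.bxor di cj == 0 then (1 : Int) else -1))).length
      = c.length * d.length := by
  simp [List.length_flatMap, mul_comm]

theorem bxor_eq_zero_iff (a b : Int) : PySem.Int.bxor a b = 0 ↔ a = b := by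
  simp only [PySem.Int.bxor]
  split_ifs with h1 h2 h2 <;> constructor <;> intro h
  · have : a.toNat ^^^ b.toNat = 0 := by exact_mod_cast h
    have := Nat.xor_eq_zero_iff.mp this; omega
  · subst h; simp
  · omega
  · omega
  · omega
  · omega
  · have : (-a-1).toNat ^^^ (-b-1).toNat = 0 := by exact_mod_cast h
    have := Nat.xor_eq_zero_iff.mp this; omega
  · subst h; simp

-- flat index m of the row-major XOR table = (m / |c|, m % |c|)
theorem pv_getD_flat (f : Int → Int → Int) (c : List Int) :
    ∀ (d : List Int) (m : Nat), m < c.length * d.length →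
      (d.flatMap (fun di => c.map (fun cj => f di cj))).getD m 0
        = f (d.getD (m / c.length) 0) (c.getD (m % c.length) 0) := by
  intro d
  induction d with
  | nil => intro m hm; simp at hm
  | cons di ds ih =>
    intro m hm
    have hc : 0 < c.length := by by_contra h; simp [Nat.le_zero.mp (Nat.not_lt.mp h)] at hm
    simp only [List.flatMap_cons]
    by_cases hlt : m < c.length
    · have hdiv : m / c.length = 0 := Nat.div_eq_of_lt hlt
      have hmod : m % c.length = m := Nat.mod_eq_of_lt hlt
      rw [List.getD_eq_getElem _ _ (by simp; omega),
          List.getElem_append_left (by simpa using hlt)]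
      simp [hdiv, hmod, List.getElem?_eq_getElem hlt, List.getD]
    · have hge : c.length ≤ m := Nat.not_lt.mp hlt
      have hm' : m - c.length < c.length * ds.length := by
        simp [Nat.mul_succ] at hm; omega
      rw [List.getD_eq_getElem _ _ (by
            simp [List.length_flatMap]
            simp [Nat.mul_succ, mul_comm] at hm ⊢; omega),
          List.getElem_append_right (by simpa using hge)]
      have := ih (m - c.length) hm'
      rw [List.getD_eq_getElem _ _ (by
            simp [List.length_flatMap, mul_comm]; omega)] at this
      simp only [List.length_map] at this ⊢
      rw [this]
      have e1 : m / c.length = (m - c.length) / c.length + 1 := by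
        conv_lhs => rw [show m = (m - c.length) + c.length by omega]
        exact Nat.add_div_right _ hc
      have e2 : m % c.length = (m - c.length) % c.length := by
        conv_lhs => rw [show m = (m - c.length) + c.length by omega]
        exact Nat.add_mod_right _ _
      simp [e1, e2]

-- one entry of A's signal list equals B's divmod term
theorem pv_sig_term (c d : List Int) (m : Nat) (hm : m < c.length * d.length) :
    PySem.List.pyGetD
        (d.flatMap (fun di => c.map (fun cj => if PySem.Int.bxor di cj == 0 then (1 : Int) else -1)))
        (m : Int) 0
      = pvTerm c d (m : Int) := by
  rw [PySem.List.pyGetD_natCast,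
      pv_getD_flat (fun di cj => if PySem.Int.bxor di cj == 0 then (1 : Int) else -1) c d m hm]
  unfold pvTerm
  simp only [PySem.Int.floordiv_natCast, PySem.Int.mod_natCast, PySem.List.pyGetD_natCast]
  simp [bxor_eq_zero_iff]

-- ===== VERDICT (by name: the statement is the Claim_ definition above) =====
theorem chain_encode_spec : Claim_equal_chain_encode := by
  intro c1 c2 c3 d1 d2 d3 _ hpre
  obtain ⟨h2, h3⟩ := hpre
  unfold Spec_chain_encode chain_encode chain_encode_alt
  simp only [pvSignal_eq]
  rw [PySem.List.foldl_append_singleton_eq_map]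
  rw [pvSignal_length c1 d1]
  rw [List.nil_append]
  apply List.map_congr_left
  intro k hk
  rw [PySem.List.mem_pyRange_one] at hk
  obtain ⟨hk0, hkn⟩ := hk
  obtain ⟨m, rfl⟩ := Int.eq_ofNat_of_zero_le hk0
  have hm1 : m < c1.length * d1.length := by exact_mod_cast hkn
  rw [pv_sig_term c1 d1 m hm1, pv_sig_term c2 d2 m (by omega), pv_sig_term c3 d3 m (by omega)]
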